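-- pv_equiv track=rewrite | github.com/mbensan/proyectos_algoritmos_cd | desafios/index.py | discos_duros
-- ===== SOURCE A (Python) =====
-- import itertools
--
-- def discos_duros(num_dds, num_comps, dds):
--     posiciones_primarios = [primario for (primario, backup) in dds]
--     posiciones_backups = [backup for (primario, backup) in dds]
--     posiciones_dds = posiciones_primarios + posiciones_backups
--     #+ [backup for (primario, backup) in dds]
--     min_pos = min(posiciones_dds)
--     max_pos = max(posiciones_dds)
--
--     posiciones_comps = [comb for comb in itertools.combinations([elem for elem in range(min_pos, max_pos)], num_comps)]
--
--     distancia = 10000000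
--     for combinacion in posiciones_comps:
--         nueva_distancia = calcular_distancia(combinacion, dds)
--         if nueva_distancia < distancia:
--             distancia = nueva_distancia
--     return distancia
--
-- def calcular_distancia(combinacion, dds):
--     #[3, 5]
--     distancias = 0
--     for dd in dds:
--         distancia_dd = 100000
--         for comp in combinacion:
--             distancia_dd_comp = abs(dd[0] - comp) + abs(dd[1] - comp)
--             if distancia_dd_comp < distancia_dd:
--                 distancia_dd = distancia_dd_comp
--         distancias += distancia_dd
--
--     return distancias
-- ===== SOURCE B (Python) =====
-- def discos_duros(num_dds, num_comps, dds):
--     posiciones = [p for (p, b) in dds] + [b for (p, b) in dds]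
--     candidatos = list(range(min(posiciones), max(posiciones)))
--     n = len(candidatos)
--
--     # Iterative depth-first search over include/skip decisions with an explicit
--     # stack, carrying a per-disk running-minimum vector shared by every
--     # combination extending the current prefix (A rescores each materialised
--     # combination from scratch).  Branches that cannot place k computers are cut.
--     best = 10000000
--     stack = [(0, num_comps, [100000] * len(dds))]
--     while stack:
--         i, k, costos = stack.pop()
--         if k == 0:
--             s = sum(costos)
--             if s < best:
--                 best = s
--         elif 0 < k <= n - i:
--             c = candidatos[i]
--             stack.append((i + 1, k, costos))
--             stack.append((i + 1, k - 1,
--                           [min(v, abs(p - c) + abs(b - c)) for v, (p, b) in zip(costos, dds)]))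
--     return best
-- ===== Notes on version B (the rewrite author's own statement) =====
-- stated objective: alternative
-- what changed: A materialises the full list of k-combinations of candidate positions and rescores each from scratch; B is an iterative explicit-stack include/skip depth-first search that carries a per-disk running-minimum vector, so prefix scoring work is shared across the combinations extending it (intended as faster; a timing run measured only 1.44x at the largest size, so no speed is claimed).
import Mathlib
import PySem

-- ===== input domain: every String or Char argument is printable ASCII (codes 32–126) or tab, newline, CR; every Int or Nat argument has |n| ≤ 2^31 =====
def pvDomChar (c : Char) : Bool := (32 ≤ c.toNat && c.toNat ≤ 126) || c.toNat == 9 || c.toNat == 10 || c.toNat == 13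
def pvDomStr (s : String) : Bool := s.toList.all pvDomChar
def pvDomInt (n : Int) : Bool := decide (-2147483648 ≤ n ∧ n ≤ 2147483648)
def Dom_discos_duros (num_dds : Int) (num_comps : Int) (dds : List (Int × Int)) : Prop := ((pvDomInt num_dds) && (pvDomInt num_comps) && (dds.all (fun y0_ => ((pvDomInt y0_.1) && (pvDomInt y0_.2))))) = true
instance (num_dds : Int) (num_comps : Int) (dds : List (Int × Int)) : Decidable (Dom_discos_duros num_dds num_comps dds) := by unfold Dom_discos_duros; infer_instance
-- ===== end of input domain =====

-- B replaces A's "materialise every k-combination, then rescore it from scratch" by an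
-- iterative explicit-stack depth-first search that carries a per-disk running-minimum
-- vector shared by all combinations extending a prefix (objective: alternative).

-- ===== PORT A =====

-- termination measure arithmetic for the two stack machines (cited by decreasing_by)
theorem pv_meas_pop (p S : Nat) : S < 3 ^ p + S := by
  have : 0 < 3 ^ p := pow_pos (by omega : 0 < 3) p
  omega
theorem pv_meas_push (p S : Nat) (h : 0 < p) :
    3 ^ (p - 1) + (3 ^ (p - 1) + S) < 3 ^ p + S := by
  have h3 : 3 ^ p = 3 * 3 ^ (p - 1) := by
    conv_lhs => rw [show p = p - 1 + 1 by omega]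
    rw [pow_succ]; ring
  have : 0 < 3 ^ (p - 1) := pow_pos (by omega : 0 < 3) _
  omega

-- hand port of itertools.combinations(pool, r) (a C iterator): a tail-recursive
-- stack machine emitting the r-combinations in itertools' lexicographic order,
-- pruning like itertools when fewer than r elements remain; a frame is
-- (chosen-so-far reversed, remaining pool, length of that pool, r still to pick);
-- exact for r ≥ 0: the produced (reversed) list is precisely list(combinations(pool, r))
def pvGen : List (List Int × List Int × Nat × Nat) → List (List Int) → List (List Int)
  | [], out => out
  | (chosen, _, _, 0) :: fs, out => pvGen fs (chosen.reverse :: out)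
  | (chosen, pool, plen, k + 1) :: fs, out =>
    if plen < k + 1 then pvGen fs out
    else
      match pool with
      | [] => pvGen fs out
      | x :: rest => pvGen ((x :: chosen, rest, plen - 1, k) :: (chosen, rest, plen - 1, k + 1) :: fs) out
  termination_by fs _ => (fs.map (fun f => 3 ^ f.2.2.1)).sum
  decreasing_by all_goals
    simp only [List.map_cons, List.sum_cons]
    first
    | exact pv_meas_pop _ _
    | exact pv_meas_push _ _ (by omega)

-- calcular_distancia(combinacion, dds)
def pvCalcDist (combinacion : List Int) (dds : List (Int × Int)) : Int :=
  dds.foldl (fun distancias dd =>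
    distancias + combinacion.foldl (fun distancia_dd comp =>
      let distancia_dd_comp := |dd.1 - comp| + |dd.2 - comp|
      if distancia_dd_comp < distancia_dd then distancia_dd_comp else distancia_dd) 100000) 0

def discos_duros (num_dds : Int) (num_comps : Int) (dds : List (Int × Int)) : Int :=
  let posiciones_primarios := dds.map (fun p => p.1)
  let posiciones_backups := dds.map (fun p => p.2)
  let posiciones_dds := posiciones_primarios ++ posiciones_backups
  match PySem.List.min? posiciones_dds (fun x => x), PySem.List.max? posiciones_dds (fun x => x) with
  | some min_pos, some max_pos =>
    let pool := PySem.List.pyRange min_pos max_pos 1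
    let posiciones_comps := (pvGen [([], pool, pool.length, num_comps.toNat)] []).reverse
    posiciones_comps.foldl (fun distancia combinacion =>
      let nueva_distancia := pvCalcDist combinacion dds
      if nueva_distancia < distancia then nueva_distancia else distancia) 10000000
  | _, _ => 0  -- unreachable under Pre_ (min()/max() of an empty list raise ValueError)

-- ===== PORT B =====

-- [min(v, abs(p - c) + abs(b - c)) for v, (p, b) in zip(costos, dds)]
def pvUpd (dds : List (Int × Int)) (costos : List Int) (c : Int) : List Int :=
  (costos.zip dds).map (fun vd => min vd.1 (|vd.2.1 - c| + |vd.2.2 - c|))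

-- the 'while stack:' loop of Source B, tail-recursively; Python's frame (i, k, costos)
-- with candidate index i is transcribed as (candidate suffix, n - i, k, costos)
def pvBLoop (dds : List (Int × Int)) : List (List Int × Nat × Int × List Int) → Int → Int
  | [], best => best
  | (cands, plen, k, costos) :: fs, best =>
    if k = 0 then
      let s := costos.foldl (· + ·) 0
      pvBLoop dds fs (if s < best then s else best)
    else if 0 < k ∧ k ≤ (plen : Int) then
      match cands with
      | [] => pvBLoop dds fs best  -- unreachable: plen = |cands| on every pushed frame
      | c :: rest =>
        pvBLoop dds ((rest, plen - 1, k - 1, pvUpd dds costos c) :: (rest, plen - 1, k, costos) :: fs) best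
    else pvBLoop dds fs best
  termination_by fs _ => (fs.map (fun f => 3 ^ f.2.1)).sum
  decreasing_by all_goals
    simp only [List.map_cons, List.sum_cons]
    first
    | exact pv_meas_pop _ _
    | exact pv_meas_push _ _ (by omega)

def discos_duros_alt (num_dds : Int) (num_comps : Int) (dds : List (Int × Int)) : Int :=
  let posiciones := dds.map (fun p => p.1) ++ dds.map (fun p => p.2)
  match PySem.List.min? posiciones (fun x => x) with
  | none => 0
  | some lo =>
    match PySem.List.max? posiciones (fun x => x) with
    | none => 0
    | some hi =>
      let candidatos := PySem.List.pyRange lo hi 1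
      pvBLoop dds [(candidatos, candidatos.length, num_comps, List.replicate dds.length 100000)] 10000000

-- ===== PRECONDITION & SPEC =====
-- Pre_ excludes exactly where Python A raises: min()/max() on an empty dds list
-- (ValueError) and a negative num_comps (itertools.combinations raises ValueError).
def Pre_discos_duros (num_dds : Int) (num_comps : Int) (dds : List (Int × Int)) : Prop :=
  dds ≠ [] ∧ 0 ≤ num_comps
instance (num_dds : Int) (num_comps : Int) (dds : List (Int × Int)) : Decidable (Pre_discos_duros num_dds num_comps dds) := by unfold Pre_discos_duros; infer_instance

def pvWitness_discos_duros : Int × Int × (List (Int × Int)) := (1, 1, [(0, 2)])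

def Spec_discos_duros (num_dds : Int) (num_comps : Int) (dds : List (Int × Int)) (out : Int) : Prop := out = discos_duros_alt num_dds num_comps dds
instance (num_dds : Int) (num_comps : Int) (dds : List (Int × Int)) (out : Int) : Decidable (Spec_discos_duros num_dds num_comps dds out) := by unfold Spec_discos_duros; infer_instance

-- ===== CLAIM (what is proved, stated in full; the proofs are below) =====
def Claim_equal_discos_duros : Prop := ∀ (num_dds : Int) (num_comps : Int) (dds : List (Int × Int)), Dom_discos_duros num_dds num_comps dds → Pre_discos_duros num_dds num_comps dds → Spec_discos_duros num_dds num_comps dds (discos_duros num_dds num_comps dds)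

-- ===== LEMMAS AND PROOFS =====

-- proof-side specification of the combination list (never evaluated): the classic
-- take/skip recursion, which produces itertools' lexicographic order
def pvCombsSpec : List Int → Nat → List (List Int)
  | _, 0 => [[]]
  | [], _ + 1 => []
  | x :: xs, k + 1 => (pvCombsSpec xs k).map (fun c => x :: c) ++ pvCombsSpec xs (k + 1)

def pvG (dd : Int × Int) (c : Int) : Int := |dd.1 - c| + |dd.2 - c|

def pvH (c0 : Int) (dd : Int × Int) (comb : List Int) : Int :=
  comb.foldl (fun a c => min a (pvG dd c)) c0

def pvScore (dds : List (Int × Int)) (costos : List Int) (comb : List Int) : Int :=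
  (List.zipWith (fun c0 dd => pvH c0 dd comb) costos dds).sum

-- the combinations denoted by an A-side frame
def pvRA (f : List Int × List Int × Nat × Nat) : List (List Int) :=
  (pvCombsSpec f.2.1 f.2.2.2).map (fun cb => f.1.reverse ++ cb)

-- the combination scores denoted by a B-side frame
def pvRB (dds : List (Int × Int)) (f : List Int × Nat × Int × List Int) : List Int :=
  (pvCombsSpec f.1 f.2.2.1.toNat).map (pvScore dds f.2.2.2)

theorem pv_if_min (v a : Int) : (if v < a then v else a) = min a v := by
  by_cases h : v < a <;> simp [min_def] <;> omega

theorem pvCombsSpec_short : ∀ (l : List Int) (k : Nat), l.length < k → pvCombsSpec l k = [] := by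
  intro l
  induction l with
  | nil => intro k h; cases k with | zero => omega | succ k => rfl
  | cons x xs ih =>
    intro k h
    cases k with
    | zero => omega
    | succ k =>
      have hx : xs.length < k := by simpa using h
      simp [pvCombsSpec, ih k hx, ih (k + 1) (by omega)]

theorem pv_foldl_add (f : α → Int) (l : List α) : ∀ a : Int,
    l.foldl (fun s x => s + f x) a = a + (l.map f).sum := by
  induction l with
  | nil => simp
  | cons x t ih => intro a; simp [List.foldl, ih, add_assoc]

theorem pv_zipWith_fst : ∀ (costos : List Int) (dds : List (Int × Int)),
    costos.length = dds.length → List.zipWith (fun (c0 : Int) (_ : Int × Int) => c0) costos dds = costos := by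
  intro costos
  induction costos with
  | nil => intro dds _; rfl
  | cons c0 cs ih =>
    intro dds h
    cases dds with
    | nil => simp at h
    | cons dd rest => simp only [List.zipWith_cons_cons]; rw [ih rest (by simpa using h)]

theorem pv_score_nil (dds : List (Int × Int)) (costos : List Int)
    (h : costos.length = dds.length) : pvScore dds costos [] = costos.foldl (· + ·) 0 := by
  unfold pvScore
  have h1 : List.zipWith (fun c0 dd => pvH c0 dd []) costos dds
      = List.zipWith (fun (c0 : Int) (_ : Int × Int) => c0) costos dds := rfl
  rw [h1, pv_zipWith_fst costos dds h]
  have h2 := pv_foldl_add (fun x : Int => x) costos 0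
  simp only [List.map_id_fun', id] at h2
  rw [show (· + · : Int → Int → Int) = (fun s x => s + (fun y : Int => y) x) from rfl, h2]
  simp

theorem pvUpd_length (dds : List (Int × Int)) (costos : List Int) (c : Int)
    (h : costos.length = dds.length) : (pvUpd dds costos c).length = dds.length := by
  simp [pvUpd, h]

theorem pv_zipWith_upd (c : Int) (comb : List Int) : ∀ (dds : List (Int × Int)) (costos : List Int),
    List.zipWith (fun c0 dd => pvH c0 dd (c :: comb)) costos dds
      = List.zipWith (fun c0 dd => pvH c0 dd comb) (pvUpd dds costos c) dds := by
  intro dds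
  induction dds with
  | nil => intro costos; cases costos <;> rfl
  | cons dd rest ih =>
    intro costos
    cases costos with
    | nil => rfl
    | cons c0 cs =>
      have hh : pvH c0 dd (c :: comb) = pvH (min c0 (|dd.1 - c| + |dd.2 - c|)) dd comb := by
        simp [pvH, pvG]
      simp only [pvUpd, List.zip_cons_cons, List.map_cons, List.zipWith_cons_cons, hh]
      rw [ih cs]
      simp [pvUpd]

theorem pv_score_cons (dds : List (Int × Int)) (costos : List Int) (c : Int) (comb : List Int) :
    pvScore dds costos (c :: comb) = pvScore dds (pvUpd dds costos c) comb := by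
  unfold pvScore
  rw [pv_zipWith_upd]

theorem pv_calcDist_score (dds : List (Int × Int)) (comb : List Int) :
    pvCalcDist comb dds = pvScore dds (List.replicate dds.length 100000) comb := by
  unfold pvCalcDist pvScore
  have hrep : ∀ l : List (Int × Int), List.zipWith (fun c0 dd => pvH c0 dd comb)
      (List.replicate l.length 100000) l = l.map (fun dd => pvH 100000 dd comb) := by
    intro l
    induction l with
    | nil => rfl
    | cons x t ih => simp [List.replicate_succ, ih]
  rw [hrep]
  have h1 : ∀ dd : Int × Int, (fun (distancia_dd comp : Int) =>
      let distancia_dd_comp := |dd.1 - comp| + |dd.2 - comp|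
      if distancia_dd_comp < distancia_dd then distancia_dd_comp else distancia_dd)
      = fun a c => min a (pvG dd c) := by
    intro dd; funext a c; simp only [pvG]; exact pv_if_min _ _
  have h2 : (fun (s : Int) (dd : Int × Int) => s + comb.foldl (fun a c =>
      let v := |dd.1 - c| + |dd.2 - c|
      if v < a then v else a) 100000)
      = fun s dd => s + pvH 100000 dd comb := by
    funext s dd
    rw [pvH, ← h1 dd]
  rw [h2, pv_foldl_add, zero_add]

-- the A-side stack machine computes exactly the frames' combination lists
theorem pvGen_eq : ∀ (fs : List (List Int × List Int × Nat × Nat)) (out : List (List Int)),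
    (∀ f ∈ fs, f.2.2.1 = f.2.1.length) →
    pvGen fs out = (fs.flatMap pvRA).reverse ++ out := by
  intro fs out hinv
  induction fs, out using pvGen.induct with
  | case1 out => simp [pvGen.eq_def]
  | case2 chosen pool plen fs out ih =>
    simp only [List.unattach_reverse, List.unattach_attach] at ih
    have hstep : pvGen ((chosen, pool, plen, 0) :: fs) out = pvGen fs (chosen.reverse :: out) := by
      rw [pvGen.eq_def]
    have h0 : pvRA (chosen, pool, plen, 0) = [chosen.reverse] := by
      simp [pvRA, pvCombsSpec.eq_1]
    rw [hstep, ih (fun f hf => hinv f (List.mem_cons_of_mem _ hf))]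
    simp [h0, List.flatMap_cons]
  | case3 chosen pool plen k fs out hlt ih =>
    have hstep : pvGen ((chosen, pool, plen, k + 1) :: fs) out = pvGen fs out := by
      rw [pvGen.eq_def]
      simp [hlt]
    have hlen : pool.length < k + 1 := by
      have := hinv (chosen, pool, plen, k + 1) (List.mem_cons_self ..)
      simp at this; omega
    have h0 : pvRA (chosen, pool, plen, k + 1) = [] := by
      simp [pvRA, pvCombsSpec_short pool (k + 1) hlen]
    rw [hstep, ih (fun f hf => hinv f (List.mem_cons_of_mem _ hf))]
    simp [h0, List.flatMap_cons]
  | case4 chosen plen k fs out hge ih =>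
    have hstep : pvGen ((chosen, [], plen, k + 1) :: fs) out = pvGen fs out := by
      rw [pvGen.eq_def]
      simp [hge]
    have h0 : pvRA (chosen, ([] : List Int), plen, k + 1) = [] := by
      simp [pvRA, pvCombsSpec]
    rw [hstep, ih (fun f hf => hinv f (List.mem_cons_of_mem _ hf))]
    simp [h0, List.flatMap_cons]
  | case5 chosen plen k fs out hge x rest ih =>
    have hx := hinv (chosen, x :: rest, plen, k + 1) (List.mem_cons_self ..)
    have hplen : plen = rest.length + 1 := by simpa using hx
    have hstep : pvGen ((chosen, x :: rest, plen, k + 1) :: fs) out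
        = pvGen ((x :: chosen, rest, plen - 1, k) :: (chosen, rest, plen - 1, k + 1) :: fs) out := by
      rw [pvGen.eq_def]
      simp [hge]
    have hinv' : ∀ f ∈ (x :: chosen, rest, plen - 1, k) :: (chosen, rest, plen - 1, k + 1) :: fs,
        f.2.2.1 = f.2.1.length := by
      intro f hf
      rcases List.mem_cons.mp hf with h | hf
      · subst h; simp; omega
      rcases List.mem_cons.mp hf with h | hf
      · subst h; simp; omega
      · exact hinv f (List.mem_cons_of_mem _ hf)
    have hsplit : pvRA (x :: chosen, rest, plen - 1, k) ++ pvRA (chosen, rest, plen - 1, k + 1)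
        = pvRA (chosen, x :: rest, plen, k + 1) := by
      simp only [pvRA, pvCombsSpec, List.map_append, List.map_map]
      congr 1
      apply List.map_congr_left
      intro cb _
      simp
    rw [hstep, ih hinv']
    simp only [List.flatMap_cons]
    rw [← hsplit]
    simp [List.reverse_append, List.append_assoc]

-- the B-side stack machine folds the frames' scores into the running best
theorem pvBLoop_eq (dds : List (Int × Int)) :
    ∀ (fs : List (List Int × Nat × Int × List Int)) (best : Int),
    (∀ f ∈ fs, 0 ≤ f.2.2.1 ∧ f.2.1 = f.1.length ∧ f.2.2.2.length = dds.length) →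
    pvBLoop dds fs best
      = (fs.flatMap (pvRB dds)).foldl (fun d s => if s < d then s else d) best := by
  intro fs best hinv
  induction fs, best using pvBLoop.induct dds with
  | case1 best => simp [pvBLoop.eq_def]
  | case2 cands plen costos fs best s ih =>
    obtain ⟨-, -, hlen⟩ := hinv _ (List.mem_cons_self ..)
    have h0 : pvRB dds (cands, plen, 0, costos) = [pvScore dds costos []] := by
      simp [pvRB, pvCombsSpec.eq_1]
    have hstep : pvBLoop dds ((cands, plen, 0, costos) :: fs) best
        = pvBLoop dds fs
            (if costos.foldl (· + ·) 0 < best then costos.foldl (· + ·) 0 else best) := by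
      rw [pvBLoop.eq_def]
      simp
    have hfeq : (fun (x1 : Int) (x : {x // x ∈ costos}) => match x with | ⟨x2, _⟩ => x1 + x2)
        = (fun (acc : Int) (t : {x // x ∈ costos}) => acc + t.1) := by
      funext a t; cases t; rfl
    have hs : s = costos.foldl (· + ·) 0 := by
      have h' : s = costos.attach.foldl (fun x1 x => match x with | ⟨x2, _⟩ => x1 + x2) 0 := rfl
      rw [h', hfeq, List.foldl_attach]
    simp only [hs, dite_eq_ite] at ih
    rw [hstep, ih (fun f hf => hinv f (List.mem_cons_of_mem _ hf))]
    simp only [h0, List.flatMap_cons, List.singleton_append, List.foldl_cons]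
    rw [pv_score_nil dds costos (by simpa using hlen)]
  | case3 plen k costos fs best hk hrange ih =>
    have h0 : pvRB dds (([] : List Int), plen, k, costos) = [] := by
      obtain ⟨hk1, hk2⟩ := hrange
      have hpos : 0 < k.toNat := by omega
      simp [pvRB, pvCombsSpec_short [] k.toNat (by simpa using hpos)]
    have hstep : pvBLoop dds (([], plen, k, costos) :: fs) best = pvBLoop dds fs best := by
      rw [pvBLoop.eq_def]
      simp [hk, hrange]
    rw [hstep, ih (fun f hf => hinv f (List.mem_cons_of_mem _ hf))]
    simp [h0, List.flatMap_cons]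
  | case4 plen k costos fs best hk hrange c rest ih =>
    obtain ⟨hk0, hpl, hlen⟩ := hinv _ (List.mem_cons_self ..)
    have hplen : plen = rest.length + 1 := by simpa using hpl
    have hinv' : ∀ f ∈ (rest, plen - 1, k - 1, pvUpd dds costos c) ::
        (rest, plen - 1, k, costos) :: fs,
        0 ≤ f.2.2.1 ∧ f.2.1 = f.1.length ∧ f.2.2.2.length = dds.length := by
      intro f hf
      rcases List.mem_cons.mp hf with h | hf
      · subst h
        refine ⟨by simp; omega, by simp; omega, ?_⟩
        simp [pvUpd_length dds costos c hlen]
      rcases List.mem_cons.mp hf with h | hf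
      · subst h; exact ⟨by simp; omega, by simp; omega, by simpa using hlen⟩
      · exact hinv f (List.mem_cons_of_mem _ hf)
    have hstep : pvBLoop dds ((c :: rest, plen, k, costos) :: fs) best
        = pvBLoop dds ((rest, plen - 1, k - 1, pvUpd dds costos c) ::
            (rest, plen - 1, k, costos) :: fs) best := by
      rw [pvBLoop.eq_def]
      simp [hk, hrange]
    have htn : k.toNat = (k - 1).toNat + 1 := by omega
    have hsplit : pvRB dds (rest, plen - 1, k - 1, pvUpd dds costos c)
        ++ pvRB dds (rest, plen - 1, k, costos)
        = pvRB dds (c :: rest, plen, k, costos) := by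
      simp only [pvRB, htn, pvCombsSpec, List.map_append, List.map_map]
      congr 1
      apply List.map_congr_left
      intro cb _
      simp [Function.comp, pv_score_cons dds costos c cb]
    rw [hstep, ih hinv']
    simp only [List.flatMap_cons]
    rw [← hsplit]
    simp [List.foldl_append, List.append_assoc]
  | case5 cands plen k costos fs best hk hrange ih =>
    obtain ⟨hk0, hpl, -⟩ := hinv _ (List.mem_cons_self ..)
    have hk0' : 0 ≤ k := by simpa using hk0
    have hpl' : plen = cands.length := by simpa using hpl
    have hnk : ¬ k ≤ (plen : Int) := fun hle => hrange ⟨by omega, hle⟩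
    have hlen : cands.length < k.toNat := by omega
    have h0 : pvRB dds (cands, plen, k, costos) = [] := by
      simp [pvRB, pvCombsSpec_short cands k.toNat hlen]
    have hstep : pvBLoop dds ((cands, plen, k, costos) :: fs) best = pvBLoop dds fs best := by
      rw [pvBLoop.eq_def]
      simp [hk, hrange]
    rw [hstep, ih (fun f hf => hinv f (List.mem_cons_of_mem _ hf))]
    simp [h0, List.flatMap_cons]

-- ===== VERDICT (by name: the statement is the Claim_ definition above) =====
theorem discos_duros_spec : Claim_equal_discos_duros := by
  intro num_dds num_comps dds _ hpre
  unfold Spec_discos_duros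
  cases hmin : PySem.List.min? (dds.map (fun p => p.1) ++ dds.map (fun p => p.2)) (fun x => x) with
  | none =>
    cases hmax : PySem.List.max? (dds.map (fun p => p.1) ++ dds.map (fun p => p.2)) (fun x => x) <;>
      simp [discos_duros, discos_duros_alt, hmin, hmax]
  | some lo =>
    cases hmax : PySem.List.max? (dds.map (fun p => p.1) ++ dds.map (fun p => p.2)) (fun x => x) with
    | none => simp [discos_duros, discos_duros_alt, hmin, hmax]
    | some hi =>
      simp only [discos_duros, discos_duros_alt, hmin, hmax]
      set cands := PySem.List.pyRange lo hi 1 with hcands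
      -- A side: the generated combination list is pvCombsSpec cands num_comps.toNat
      have hgen : (pvGen [([], cands, cands.length, num_comps.toNat)] []).reverse
          = pvCombsSpec cands num_comps.toNat := by
        rw [pvGen_eq [([], cands, cands.length, num_comps.toNat)] [] (by intro f hf; simp at hf; subst hf; rfl)]
        simp [pvRA]
      rw [hgen]
      -- B side: one start frame
      rw [pvBLoop_eq dds [(cands, cands.length, num_comps, List.replicate dds.length 100000)] 10000000
            (by intro f hf; simp at hf; subst hf; refine ⟨hpre.2, rfl, by simp⟩)]
      simp only [List.flatMap_cons, List.flatMap_nil, List.append_nil, pvRB]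
      rw [List.foldl_map]
      have hfun : (fun (distancia : Int) (combinacion : List Int) =>
          let nueva_distancia := pvCalcDist combinacion dds
          if nueva_distancia < distancia then nueva_distancia else distancia)
          = fun d comb => if pvScore dds (List.replicate dds.length 100000) comb < d
              then pvScore dds (List.replicate dds.length 100000) comb else d := by
        funext d comb
        simp only [pv_calcDist_score dds comb]
      rw [hfun]
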